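-- pv_equiv track=rewrite | github.com/mlabudde/wcc | src/main/python/utils/String.py | massageName
-- ===== SOURCE A (Python) =====
-- def massageName(name):
--     result = ""
--     cnc = True
--     rawName = list(name.lower())
--     for c in rawName:
--         if cnc:
--             # result = result + c.upper()
--             result += c.upper()
--             cnc = False
--         else:
--             result += c
--         if c == ' ' or c == '\'':
--             cnc = True
--     if result.startswith('Mcc'):
--         result = result.replace('Mcc', 'McC')
--     return result
-- ===== SOURCE B (Python) =====
-- def massageName(name):
--     low = name.lower()
--     out = " ".join(
--         "'".join(p[:1].upper() + p[1:] for p in w.split("'"))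
--         for w in low.split(" ")
--     )
--     if out.startswith("Mcc"):
--         out = out.replace("Mcc", "McC")
--     return out
-- ===== Notes on version B (the rewrite author's own statement) =====
-- stated objective: alternative
-- what changed: Replaces A's single stateful capitalize-next-flag character loop with a staged split/map/join pipeline: lowercase once, split on spaces and then on apostrophes, uppercase each piece's first character, and rejoin with the delimiters, keeping the Mcc->McC fixup.
import Mathlib
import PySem

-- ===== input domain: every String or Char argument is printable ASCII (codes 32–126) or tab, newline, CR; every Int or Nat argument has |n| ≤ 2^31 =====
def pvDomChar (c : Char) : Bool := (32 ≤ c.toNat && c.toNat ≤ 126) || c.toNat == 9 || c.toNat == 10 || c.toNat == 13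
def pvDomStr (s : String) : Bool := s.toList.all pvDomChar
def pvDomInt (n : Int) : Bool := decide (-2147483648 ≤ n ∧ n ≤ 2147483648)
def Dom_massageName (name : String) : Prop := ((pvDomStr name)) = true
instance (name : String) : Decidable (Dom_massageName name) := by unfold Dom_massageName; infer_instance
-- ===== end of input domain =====

-- B recomputes the same result by splitting the lowercased name on the delimiters and
-- capitalizing each piece's first character, instead of A's stateful flag loop (alternative; same values).

-- ===== PORT A =====
def massageName (name : String) : String :=
  let rawName := (PySem.Str.lower name).toList
  let st := rawName.foldl (fun (st : String × Bool) c =>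
      let result := if st.2 then st.1.push (PySem.Chars.upperChar c) else st.1.push c
      (result, c == ' ' || c == '\'')) ("", true)
  let result := st.1
  if PySem.Str.startswith result "Mcc" then PySem.Str.replace result "Mcc" "McC" else result

-- ===== PORT B =====
-- hand port of Python's s.split(d) for a one-character separator d, exact (empty pieces kept):
-- returns (first piece, remaining pieces); the Python list of pieces is p :: ps.
def splitChar (d : Char) : List Char → List Char × List (List Char)
  | [] => ([], [])
  | c :: cs =>
      let (p, ps) := splitChar d cs
      if c = d then ([], p :: ps) else (c :: p, ps)

-- hand port of d.join(p :: ps), exact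
def joinChar (d : Char) (p : List Char) (ps : List (List Char)) : List Char :=
  p ++ ps.flatMap (fun q => d :: q)

-- p[:1].upper() + p[1:]
def capFirst (p : List Char) : List Char :=
  PySem.Chars.upper (PySem.List.slice p none (some 1)) ++ PySem.List.slice p (some 1) none

def massageName_alt (name : String) : String :=
  let low := (PySem.Str.lower name).toList
  let inner := fun (w : List Char) =>
    let (p, ps) := splitChar '\'' w
    joinChar '\'' (capFirst p) (ps.map capFirst)
  let (w, ws) := splitChar ' ' low
  let out := String.ofList (joinChar ' ' (inner w) (ws.map inner))
  if PySem.Str.startswith out "Mcc" then PySem.Str.replace out "Mcc" "McC" else out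

-- ===== PRECONDITION & SPEC =====
def Spec_massageName (name : String) (out : String) : Prop := out = massageName_alt name
instance (name : String) (out : String) : Decidable (Spec_massageName name out) := by unfold Spec_massageName; infer_instance

-- ===== CLAIM (what is proved, stated in full; the proofs are below) =====
def Claim_equal_massageName : Prop := ∀ (name : String), Dom_massageName name → Spec_massageName name (massageName name)

-- ===== LEMMAS AND PROOFS =====

-- reference function: A's loop body as structural recursion on the character list
def pvF (b : Bool) : List Char → List Char
  | [] => []
  | c :: cs => (if b then PySem.Chars.upperChar c else c) :: pvF (c == ' ' || c == '\'') cs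

theorem pvFoldA (l : List Char) : ∀ (acc : String) (b : Bool),
    ((l.foldl (fun (st : String × Bool) c =>
      ((if st.2 then st.1.push (PySem.Chars.upperChar c) else st.1.push c : String),
       (c == ' ' || c == '\''))) (acc, b)).1).toList
    = acc.toList ++ pvF b l := by
  induction l with
  | nil => intro acc b; simp [pvF]
  | cons c cs ih =>
    intro acc b
    by_cases h : b = true
    · simp [h, pvF, ih]
    · simp only [Bool.not_eq_true] at h
      simp [h, pvF, ih]

-- every character of every piece of splitChar d l is a character of l and is not d
theorem pvSplitMem (d : Char) (l : List Char) :
    (∀ c ∈ (splitChar d l).1, c ∈ l ∧ c ≠ d) ∧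
    (∀ q ∈ (splitChar d l).2, ∀ c ∈ q, c ∈ l ∧ c ≠ d) := by
  induction l with
  | nil => simp [splitChar]
  | cons x xs ih =>
    obtain ⟨ih1, ih2⟩ := ih
    by_cases h : x = d
    · constructor
      · simp [splitChar, h]
      · intro q hq c hc
        simp only [splitChar, h] at hq
        rcases List.mem_cons.mp hq with rfl | hq
        · exact ⟨List.mem_cons_of_mem _ (ih1 c hc).1, (ih1 c hc).2⟩
        · exact ⟨List.mem_cons_of_mem _ (ih2 q hq c hc).1, (ih2 q hq c hc).2⟩
    · constructor
      · intro c hc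
        simp only [splitChar, if_neg h] at hc
        rcases List.mem_cons.mp hc with rfl | hc
        · exact ⟨List.mem_cons_self, h⟩
        · exact ⟨List.mem_cons_of_mem _ (ih1 c hc).1, (ih1 c hc).2⟩
      · intro q hq c hc
        simp only [splitChar, if_neg h] at hq
        exact ⟨List.mem_cons_of_mem _ (ih2 q hq c hc).1, (ih2 q hq c hc).2⟩

-- splitting off pieces commutes with A's loop, for a delimiter fixed by upperChar
theorem pvSplitF (d : Char) (hd : PySem.Chars.upperChar d = d)
    (hflag : (d == ' ' || d == '\'') = true) (l : List Char) : ∀ (b : Bool),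
    pvF b l = joinChar d (pvF b (splitChar d l).1) (((splitChar d l).2).map (pvF true)) := by
  induction l with
  | nil => intro b; simp [splitChar, joinChar, pvF]
  | cons c cs ih =>
    intro b
    by_cases h : c = d
    · subst h
      simp only [splitChar]
      have := ih true
      simp [pvF, joinChar, hd, hflag, this]
    · simp only [splitChar, if_neg h]
      have := ih (c == ' ' || c == '\'')
      simp [pvF, joinChar, this]

-- on a piece with no delimiters the flag stays false
theorem pvFfalse (p : List Char) (hp : ∀ c ∈ p, c ≠ ' ' ∧ c ≠ '\'') :
    pvF false p = p := by
  induction p with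
  | nil => rfl
  | cons c cs ih =>
    have hc := hp c List.mem_cons_self
    have : (c == ' ' || c == '\'') = false := by
      simp [hc.1, hc.2]
    simp [pvF, this, ih (fun x hx => hp x (List.mem_cons_of_mem _ hx))]

-- on a piece with no delimiters A's loop capitalizes exactly the first character
theorem pvFcap (p : List Char) (hp : ∀ c ∈ p, c ≠ ' ' ∧ c ≠ '\'') :
    pvF true p = capFirst p := by
  cases p with
  | nil => simp [pvF, capFirst, PySem.Chars.upper, PySem.List.slice]
  | cons c cs =>
    have hc := hp c List.mem_cons_self
    have hflag : (c == ' ' || c == '\'') = false := by simp [hc.1, hc.2]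
    have h1 : PySem.List.slice (c :: cs) none (some 1) = [c] := by
      have := PySem.List.slice_to_natCast (xs := c :: cs) (b := 1)
      simpa using this
    have h2 : PySem.List.slice (c :: cs) (some 1) none = cs := by
      have := PySem.List.slice_from_natCast (xs := c :: cs) (a := 1)
      simpa using this
    simp [pvF, capFirst, h1, h2, PySem.Chars.upper, hflag,
      pvFfalse cs (fun x hx => hp x (List.mem_cons_of_mem _ hx))]

-- the inner (apostrophe) stage agrees with A's loop on any space-free word
theorem pvInner (w : List Char) (hw : ∀ c ∈ w, c ≠ ' ') :
    pvF true w
      = (let (p, ps) := splitChar '\'' w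
         joinChar '\'' (capFirst p) (ps.map capFirst)) := by
  obtain ⟨m1, m2⟩ := pvSplitMem '\'' w
  have h := pvSplitF '\'' (by decide) (by decide) w true
  rw [h]
  have hp : pvF true (splitChar '\'' w).1 = capFirst (splitChar '\'' w).1 :=
    pvFcap _ (fun c hc => ⟨hw c (m1 c hc).1, (m1 c hc).2⟩)
  have hps : ((splitChar '\'' w).2).map (pvF true) = ((splitChar '\'' w).2).map capFirst :=
    List.map_congr_left (fun q hq =>
      pvFcap q (fun c hc => ⟨hw c (m2 q hq c hc).1, (m2 q hq c hc).2⟩))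
  simp [hp, hps]

-- the two ports build the same character list before the Mcc fixup
theorem pvCore (l : List Char) :
    pvF true l
      = (let inner := fun (w : List Char) =>
           let (p, ps) := splitChar '\'' w
           joinChar '\'' (capFirst p) (ps.map capFirst)
         let (w, ws) := splitChar ' ' l
         joinChar ' ' (inner w) (ws.map inner)) := by
  obtain ⟨m1, m2⟩ := pvSplitMem ' ' l
  have h := pvSplitF ' ' (by decide) (by decide) l true
  rw [h]
  have hw : pvF true (splitChar ' ' l).1
      = (let (p, ps) := splitChar '\'' (splitChar ' ' l).1
         joinChar '\'' (capFirst p) (ps.map capFirst)) :=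
    pvInner _ (fun c hc => (m1 c hc).2)
  have hws : ((splitChar ' ' l).2).map (pvF true)
      = ((splitChar ' ' l).2).map (fun w =>
          let (p, ps) := splitChar '\'' w
          joinChar '\'' (capFirst p) (ps.map capFirst)) :=
    List.map_congr_left (fun q hq => pvInner q (fun c hc => (m2 q hq c hc).2))
  simp only [hw, hws]

-- ===== VERDICT (by name: the statement is the Claim_ definition above) =====
theorem massageName_spec : Claim_equal_massageName := by
  intro name _
  unfold Spec_massageName massageName massageName_alt
  simp only []
  have hA := pvFoldA ((PySem.Str.lower name).toList) "" true
  have hcore := pvCore ((PySem.Str.lower name).toList)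
  simp only [] at hcore
  have hs : ((((PySem.Str.lower name).toList).foldl (fun (st : String × Bool) c =>
      ((if st.2 then st.1.push (PySem.Chars.upperChar c) else st.1.push c : String),
       (c == ' ' || c == '\''))) ("", true)).1)
      = String.ofList ((fun (st : List Char × List (List Char)) =>
          joinChar ' '
            ((fun w => (fun (q : List Char × List (List Char)) =>
                joinChar '\'' (capFirst q.1) (q.2.map capFirst)) (splitChar '\'' w)) st.1)
            (st.2.map (fun w => (fun (q : List Char × List (List Char)) =>
                joinChar '\'' (capFirst q.1) (q.2.map capFirst)) (splitChar '\'' w))))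
          (splitChar ' ' ((PySem.Str.lower name).toList))) := by
    apply String.toList_injective
    rw [String.toList_ofList, hA, hcore]
    simp
  rw [hs]
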